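-- pv_equiv track=rewrite | github.com/aiseungjun/FDK-OPT-R | peak_sigma_estimate.py | _flatten_groups
-- ===== SOURCE A (Python) =====
-- from typing import Any
--
-- def _flatten_groups(
--     groups: dict[Any, list[tuple[int, Any]]],
-- ) -> list[tuple[str, int, Any]]:
--     refs: list[tuple[str, int, Any]] = []
--     for group_id, items in groups.items():
--         for frame_idx, ref in items:
--             refs.append((str(group_id), int(frame_idx), ref))
--     refs.sort(key=lambda x: (x[0], x[1]))
--     return refs
-- ===== SOURCE B (Python) =====
-- def _flatten_groups(groups):
--     buckets = {}
--     for group_id, items in groups.items():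
--         for frame_idx, ref in items:
--             k = str(group_id)
--             buckets[k] = buckets.get(k, []) + [(int(frame_idx), ref)]
--     out = []
--     for k in sorted(buckets):
--         for frame_idx, ref in sorted(buckets[k], key=lambda t: t[0]):
--             out.append((k, frame_idx, ref))
--     return out
-- ===== Notes on version B (the rewrite author's own statement) =====
-- stated objective: alternative
-- what changed: Instead of flattening everything and doing one global sort by the (key, frame) tuple, B groups items into a dict of per-key buckets, iterates the keys in sorted order and stably sorts each bucket by frame index only.
import Mathlib
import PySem

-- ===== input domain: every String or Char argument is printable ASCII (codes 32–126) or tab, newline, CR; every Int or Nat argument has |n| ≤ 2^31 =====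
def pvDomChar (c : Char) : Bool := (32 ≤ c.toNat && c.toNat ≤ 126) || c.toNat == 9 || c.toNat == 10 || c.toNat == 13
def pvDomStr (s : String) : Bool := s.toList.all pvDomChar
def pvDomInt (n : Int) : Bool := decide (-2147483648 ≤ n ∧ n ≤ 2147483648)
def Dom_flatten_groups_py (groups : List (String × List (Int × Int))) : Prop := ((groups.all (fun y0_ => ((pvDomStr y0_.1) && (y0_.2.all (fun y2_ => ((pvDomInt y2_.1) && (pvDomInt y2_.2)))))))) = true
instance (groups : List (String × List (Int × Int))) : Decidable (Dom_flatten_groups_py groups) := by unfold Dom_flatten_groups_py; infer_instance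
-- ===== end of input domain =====

-- B replaces A's single global sort by the (key, frame) tuple with a dict of per-key
-- buckets, iterated in sorted key order with each bucket stably sorted by frame only
-- (objective: alternative decomposition; same result, proved below).

-- ===== PORT A =====
-- for each group: for each item: refs.append((str(gid), int(f), ref)); refs.sort(key=(x[0], x[1]))
def flatten_groups_py (groups : List (String × List (Int × Int))) : List (String × Int × Int) :=
  let refs : List (String × Int × Int) :=
    groups.foldl (fun refs g =>
      g.2.foldl (fun refs p => refs ++ [(g.1, p.1, p.2)]) refs) []
  PySem.List.sorted2 refs (fun x => x.1) (fun x => x.2.1) false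

-- ===== PORT B =====
-- buckets[k] = buckets.get(k, []) + [(f, ref)]; then for k in sorted(buckets):
--   for (f, ref) in sorted(buckets[k], key=t[0]): out.append((k, f, ref))
def flatten_groups_py_alt (groups : List (String × List (Int × Int))) : List (String × Int × Int) :=
  let buckets : PySem.Dict String (List (Int × Int)) :=
    groups.foldl (fun d g =>
      g.2.foldl (fun d p => d.modify g.1 [] (fun v => v ++ [p])) d) PySem.Dict.empty
  (PySem.List.sorted buckets.keys (fun k => k) false).foldl (fun out k =>
    (PySem.List.sorted (buckets.getD k []) (fun t => t.1) false).foldl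
      (fun out t => out ++ [(k, t.1, t.2)]) out) []

-- ===== PRECONDITION & SPEC =====
def Spec_flatten_groups_py (groups : List (String × List (Int × Int))) (out : List (String × Int × Int)) : Prop := out = flatten_groups_py_alt groups
instance (groups : List (String × List (Int × Int))) (out : List (String × Int × Int)) : Decidable (Spec_flatten_groups_py groups out) := by unfold Spec_flatten_groups_py; infer_instance

-- ===== CLAIM (what is proved, stated in full; the proofs are below) =====
def Claim_equal_flatten_groups_py : Prop := ∀ (groups : List (String × List (Int × Int))), Dom_flatten_groups_py groups → Spec_flatten_groups_py groups (flatten_groups_py groups)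

-- ===== LEMMAS AND PROOFS =====

-- the flat list of (key, frame, ref) triples and of (key, item) pairs
def pvFlat (groups : List (String × List (Int × Int))) : List (String × Int × Int) :=
  groups.flatMap (fun g => g.2.map (fun p => (g.1, p.1, p.2)))

def pvPairs (groups : List (String × List (Int × Int))) : List (String × (Int × Int)) :=
  groups.flatMap (fun g => g.2.map (fun p => (g.1, p)))

-- the canonical form both ports are reduced to
def pvCanon (xs : List (String × Int × Int)) : List (String × Int × Int) :=
  (PySem.List.sorted (PySem.List.dedup (xs.map (fun x => x.1))) (fun c => c) false).flatMap
    (fun c => PySem.List.sorted (xs.filter (fun x => x.1 == c)) (fun x => x.2.1) false)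

-- generic insertBy facts
theorem pv_insertBy_cons {α : Type} (before : α → α → Bool) (x y : α) (l : List α) :
    PySem.List.insertBy before x (y :: l)
      = if before x y then x :: y :: l else y :: PySem.List.insertBy before x l := rfl

theorem pv_insertBy_append_left {α : Type} (before : α → α → Bool) (x : α) (l r : List α)
    (h : ∀ y ∈ l, before x y = false) :
    PySem.List.insertBy before x (l ++ r) = l ++ PySem.List.insertBy before x r := by
  induction l with
  | nil => rfl
  | cons y l ih =>
    rw [List.cons_append, pv_insertBy_cons, if_neg (by simp [h y (by simp)]),
      ih (fun z hz => h z (by simp [hz])), List.cons_append]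

theorem pv_insertBy_cons_all {α : Type} (before : α → α → Bool) (x : α) (r : List α)
    (h : ∀ y ∈ r, before x y = true) :
    PySem.List.insertBy before x r = x :: r := by
  cases r with
  | nil => rfl
  | cons y ys => simp [PySem.List.insertBy, h y (by simp)]

theorem pv_insertBy_append_right {α : Type} (before : α → α → Bool) (x : α) (l r : List α)
    (h : ∀ y ∈ r, before x y = true) :
    PySem.List.insertBy before x (l ++ r) = PySem.List.insertBy before x l ++ r := by
  induction l with
  | nil => simpa [PySem.List.insertBy] using pv_insertBy_cons_all before x r h
  | cons y l ih =>
    by_cases hb : before x y = true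
    · simp [PySem.List.insertBy, hb]
    · simp only [Bool.not_eq_true] at hb
      simp [PySem.List.insertBy, hb, ih]

theorem pv_insertBy_congr {α : Type} (before before' : α → α → Bool) (x : α) (l : List α)
    (h : ∀ y ∈ l, before x y = before' x y) :
    PySem.List.insertBy before x l = PySem.List.insertBy before' x l := by
  induction l with
  | nil => rfl
  | cons y l ih =>
    simp only [PySem.List.insertBy, h y (by simp)]
    rw [ih (fun z hz => h z (by simp [hz]))]

theorem pv_insertBy_map {α β : Type} (before : β → β → Bool) (f : α → β) (x : α) (l : List α) :
    PySem.List.insertBy before (f x) (l.map f)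
      = (PySem.List.insertBy (fun a b => before (f a) (f b)) x l).map f := by
  induction l with
  | nil => rfl
  | cons y l ih =>
    by_cases hb : before (f x) (f y) = true
    · simp [PySem.List.insertBy, hb]
    · simp only [Bool.not_eq_true] at hb
      simp [PySem.List.insertBy, hb, ih]

theorem pv_sorted_map_aux {α β κ : Type} [LinearOrder κ] (f : α → β) (key : β → κ)
    (l : List α) (acc : List α) :
    l.foldl (fun acc x => PySem.List.insertBy (fun a b => decide (key a < key b)) (f x) acc) (acc.map f)
      = (l.foldl (fun acc x => PySem.List.insertBy (fun a b => decide (key (f a) < key (f b))) x acc) acc).map f := by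
  induction l generalizing acc with
  | nil => rfl
  | cons x l ih =>
    simp only [List.foldl_cons]
    rw [pv_insertBy_map (fun a b => decide (key a < key b)) f x acc, ih]

theorem pv_sorted_map {α β κ : Type} [LinearOrder κ] (l : List α) (f : α → β) (key : β → κ) :
    PySem.List.sorted (l.map f) key false
      = (PySem.List.sorted l (fun a => key (f a)) false).map f := by
  rw [PySem.List.sorted_eq_foldl_insertBy, PySem.List.sorted_eq_foldl_insertBy, List.foldl_map]
  exact pv_sorted_map_aux f key l []

-- appending one element to a sorted fold
theorem pv_sorted_append_singleton {α κ : Type} [LinearOrder κ] (xs : List α) (x : α) (key : α → κ) :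
    PySem.List.sorted (xs ++ [x]) key false
      = PySem.List.insertBy (fun a b => decide (key a < key b)) x (PySem.List.sorted xs key false) := by
  simp [PySem.List.sorted, List.foldl_append]

theorem pv_sorted2_append_singleton (xs : List (String × Int × Int)) (x : String × Int × Int) :
    PySem.List.sorted2 (xs ++ [x]) (fun y => y.1) (fun y => y.2.1) false
      = PySem.List.insertBy
          (fun a b => decide (a.1 < b.1) || (!decide (b.1 < a.1) && decide (a.2.1 < b.2.1)))
          x (PySem.List.sorted2 xs (fun y => y.1) (fun y => y.2.1) false) := by
  simp [PySem.List.sorted2, List.foldl_append]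

theorem pv_flatMap_congr {α β : Type} (l : List α) (f g : α → List β)
    (h : ∀ a ∈ l, f a = g a) : l.flatMap f = l.flatMap g := by
  induction l with
  | nil => rfl
  | cons a l ih =>
    simp only [List.flatMap_cons, h a (by simp)]
    rw [ih (fun b hb => h b (by simp [hb]))]

-- splitting a strictly increasing list at a member / at an insertion point
theorem pv_mem_split {c : String} {K : List String} (hK : K.Pairwise (· < ·)) (hc : c ∈ K) :
    ∃ K1 K2, K = K1 ++ c :: K2 ∧ (∀ y ∈ K1, y < c) ∧ (∀ y ∈ K2, c < y) := by
  obtain ⟨K1, K2, rfl⟩ := List.append_of_mem hc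
  rw [List.pairwise_append] at hK
  refine ⟨K1, K2, rfl, fun y hy => hK.2.2 y hy c (by simp), ?_⟩
  have := hK.2.1
  simp only [List.pairwise_cons] at this
  exact this.1

theorem pv_insertBy_lt_split {c : String} {K : List String} (hK : K.Pairwise (· < ·)) (hc : c ∉ K) :
    ∃ K1 K2, PySem.List.insertBy (fun a b => decide (a < b)) c K = K1 ++ c :: K2
      ∧ K = K1 ++ K2 ∧ (∀ y ∈ K1, y < c) ∧ (∀ y ∈ K2, c < y) := by
  induction K with
  | nil => exact ⟨[], [], rfl, rfl, by simp, by simp⟩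
  | cons k K ih =>
    simp only [List.pairwise_cons] at hK
    by_cases h : c < k
    · refine ⟨[], k :: K, by simp [PySem.List.insertBy, h], rfl, by simp, ?_⟩
      intro y hy
      rcases List.mem_cons.mp hy with rfl | hy
      · exact h
      · exact h.trans (hK.1 y hy)
    · have hkc : k < c := by
        rcases lt_trichotomy c k with h' | h' | h'
        · exact absurd h' h
        · exact absurd (h' ▸ List.mem_cons_self) hc
        · exact h'
      obtain ⟨K1, K2, he, hs, h1, h2⟩ := ih hK.2 (fun hm => hc (List.mem_cons.mpr (Or.inr hm)))
      refine ⟨k :: K1, K2, ?_, by simp [hs], ?_, h2⟩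
      · rw [List.cons_append, pv_insertBy_cons, if_neg (by simp [h]), he]
      · intro y hy
        rcases List.mem_cons.mp hy with rfl | hy
        · exact hkc
        · exact h1 y hy

theorem pv_key_of_mem_bucket {xs : List (String × Int × Int)} {c : String} {y : String × Int × Int}
    (hy : y ∈ PySem.List.sorted (xs.filter (fun z => z.1 == c)) (fun z => z.2.1) false) : y.1 = c := by
  rw [PySem.List.mem_sorted] at hy
  simpa using (List.mem_filter.mp hy).2

theorem pv_dedup_append_singleton (l : List String) (c : String) :
    PySem.List.dedup (l ++ [c])
      = if c ∈ PySem.List.dedup l then PySem.List.dedup l else PySem.List.dedup l ++ [c] := by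
  simp only [PySem.List.dedup_eq_ofList, PySem.Set.ofList_eq_foldl, List.foldl_append]
  simp only [List.foldl_cons, List.foldl_nil, PySem.Set.add, PySem.Set.contains]
  split_ifs with h1 h2 h2 <;> simp_all

-- one insertion step commutes with the bucket decomposition
theorem pv_canon_append (xs : List (String × Int × Int)) (x : String × Int × Int) :
    pvCanon (xs ++ [x])
      = PySem.List.insertBy
          (fun a b => decide (a.1 < b.1) || (!decide (b.1 < a.1) && decide (a.2.1 < b.2.1)))
          x (pvCanon xs) := by
  set lex : (String × Int × Int) → (String × Int × Int) → Bool :=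
    fun a b => decide (a.1 < b.1) || (!decide (b.1 < a.1) && decide (a.2.1 < b.2.1)) with hlex
  set g : String → List (String × Int × Int) :=
    fun c => PySem.List.sorted (xs.filter (fun z => z.1 == c)) (fun z => z.2.1) false with hg
  set g' : String → List (String × Int × Int) :=
    fun c => PySem.List.sorted ((xs ++ [x]).filter (fun z => z.1 == c)) (fun z => z.2.1) false with hg'
  have hgg' : ∀ c, x.1 ≠ c → g' c = g c := by
    intro c hc
    simp [hg, hg', List.filter_append, hc]
  have hKpw : (PySem.List.sorted (PySem.List.dedup (xs.map (fun z => z.1))) (fun c => c) false).Pairwise (· < ·) := by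
    simp only [PySem.List.dedup_eq_ofList]
    exact PySem.List.sorted_ofList_pairwise_lt _
  set K : List String := PySem.List.sorted (PySem.List.dedup (xs.map (fun z => z.1))) (fun c => c) false with hK
  have hmemK : ∀ c, c ∈ K ↔ c ∈ xs.map (fun z => z.1) := by
    intro c
    rw [hK, PySem.List.mem_sorted, PySem.List.mem_dedup]
  have hcanon : pvCanon xs = K.flatMap g := rfl
  have hmap : (xs ++ [x]).map (fun z => z.1) = xs.map (fun z => z.1) ++ [x.1] := by
    simp
  by_cases hx : x.1 ∈ xs.map (fun z => z.1)
  · -- existing key: the key list is unchanged, x is inserted into its bucket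
    have hxD : x.1 ∈ PySem.List.dedup (xs.map (fun z => z.1)) := by
      rwa [PySem.List.mem_dedup]
    have hK' : pvCanon (xs ++ [x]) = K.flatMap g' := by
      unfold pvCanon
      rw [hmap, pv_dedup_append_singleton, if_pos hxD]
    obtain ⟨K1, K2, hsplit, h1, h2⟩ := pv_mem_split hKpw ((hmemK x.1).mpr hx)
    have hB1 : ∀ y ∈ K1.flatMap g, lex x y = false := by
      intro y hy
      obtain ⟨c', hc', hyc⟩ := List.mem_flatMap.mp hy
      have hy1 : y.1 = c' := pv_key_of_mem_bucket hyc
      have hlt : y.1 < x.1 := hy1 ▸ h1 c' hc'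
      simp only [hlex]
      rw [decide_eq_false (asymm hlt), decide_eq_true hlt]
      simp
    have hB2 : ∀ y ∈ K2.flatMap g, lex x y = true := by
      intro y hy
      obtain ⟨c', hc', hyc⟩ := List.mem_flatMap.mp hy
      have hy1 : y.1 = c' := pv_key_of_mem_bucket hyc
      have hlt : x.1 < y.1 := hy1 ▸ h2 c' hc'
      simp only [hlex]
      rw [decide_eq_true hlt]
      simp
    have hBx : ∀ y ∈ g x.1, lex x y = (fun a b : String × Int × Int => decide (a.2.1 < b.2.1)) x y := by
      intro y hy
      have hy1 : y.1 = x.1 := pv_key_of_mem_bucket hy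
      have ha : ¬ x.1 < y.1 := by rw [hy1]; exact lt_irrefl _
      have hb : ¬ y.1 < x.1 := by rw [hy1]; exact lt_irrefl _
      simp only [hlex]
      rw [decide_eq_false ha, decide_eq_false hb]
      simp
    rw [hK', hsplit, hcanon, hsplit]
    rw [List.flatMap_append, List.flatMap_cons, List.flatMap_append, List.flatMap_cons]
    rw [pv_insertBy_append_left lex x _ _ hB1]
    rw [pv_insertBy_append_right lex x (g x.1) (K2.flatMap g) hB2]
    rw [pv_insertBy_congr lex (fun a b => decide (a.2.1 < b.2.1)) x (g x.1) hBx]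
    have hbx : g' x.1 = PySem.List.insertBy (fun a b : String × Int × Int => decide (a.2.1 < b.2.1)) x (g x.1) := by
      have : (xs ++ [x]).filter (fun z => z.1 == x.1) = xs.filter (fun z => z.1 == x.1) ++ [x] := by
        simp [List.filter_append]
      simp only [hg']
      rw [this, pv_sorted_append_singleton]
    rw [pv_flatMap_congr K1 g' g (fun c hc => hgg' c (fun he => absurd (he ▸ h1 c hc) (lt_irrefl x.1))),
        pv_flatMap_congr K2 g' g (fun c hc => hgg' c (fun he => absurd (he ▸ h2 c hc) (lt_irrefl x.1))),
        hbx]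
  · -- new key: x.1 is inserted into the key list with a singleton bucket
    have hxD : x.1 ∉ PySem.List.dedup (xs.map (fun z => z.1)) := by
      rwa [PySem.List.mem_dedup]
    obtain ⟨K1, K2, hins, hKsplit, h1, h2⟩ :=
      pv_insertBy_lt_split (c := x.1) hKpw (fun h => hx ((hmemK x.1).mp h))
    have hK' : pvCanon (xs ++ [x]) = (K1 ++ x.1 :: K2).flatMap g' := by
      unfold pvCanon
      rw [hmap, pv_dedup_append_singleton, if_neg hxD, pv_sorted_append_singleton, ← hK, ← hins]
    have hbx : g' x.1 = [x] := by
      have hfil : xs.filter (fun z => z.1 == x.1) = [] := by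
        rw [List.filter_eq_nil_iff]
        intro z hz hzx
        exact hx (List.mem_map.mpr ⟨z, hz, by simpa using hzx.symm⟩)
      have : (xs ++ [x]).filter (fun z => z.1 == x.1) = [x] := by
        simp [List.filter_append, hfil]
      simp only [hg']
      rw [this]
      rfl
    have hB1 : ∀ y ∈ K1.flatMap g, lex x y = false := by
      intro y hy
      obtain ⟨c', hc', hyc⟩ := List.mem_flatMap.mp hy
      have hy1 : y.1 = c' := pv_key_of_mem_bucket hyc
      have hlt : y.1 < x.1 := hy1 ▸ h1 c' hc'
      simp only [hlex]
      rw [decide_eq_false (asymm hlt), decide_eq_true hlt]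
      simp
    have hB2 : ∀ y ∈ K2.flatMap g, lex x y = true := by
      intro y hy
      obtain ⟨c', hc', hyc⟩ := List.mem_flatMap.mp hy
      have hy1 : y.1 = c' := pv_key_of_mem_bucket hyc
      have hlt : x.1 < y.1 := hy1 ▸ h2 c' hc'
      simp only [hlex]
      rw [decide_eq_true hlt]
      simp
    rw [hK', hcanon, hKsplit]
    rw [List.flatMap_append, List.flatMap_append, List.flatMap_cons]
    rw [pv_insertBy_append_left lex x _ _ hB1,
        pv_insertBy_cons_all lex x _ hB2, hbx]
    rw [pv_flatMap_congr K1 g' g (fun c hc => hgg' c (fun he => absurd (he ▸ h1 c hc) (lt_irrefl x.1))),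
        pv_flatMap_congr K2 g' g (fun c hc => hgg' c (fun he => absurd (he ▸ h2 c hc) (lt_irrefl x.1)))]
    simp

-- the key decomposition: a stable sort by (key, frame) is, bucket by bucket in
-- ascending key order, a stable sort by frame
theorem pv_sorted2_eq_canon (xs : List (String × Int × Int)) :
    PySem.List.sorted2 xs (fun y => y.1) (fun y => y.2.1) false = pvCanon xs := by
  induction xs using List.reverseRecOn with
  | nil => rfl
  | append_singleton xs x ih =>
    rw [pv_sorted2_append_singleton, ih, pv_canon_append]

theorem pv_refs_eq (groups : List (String × List (Int × Int))) (acc : List (String × Int × Int)) :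
    groups.foldl (fun refs g => g.2.foldl (fun refs p => refs ++ [(g.1, p.1, p.2)]) refs) acc
      = acc ++ pvFlat groups := by
  have h1 : List.foldl (fun refs g => List.foldl (fun refs p => refs ++ [(g.1, p.1, p.2)]) refs g.2) acc groups
      = List.foldl (fun refs g => refs ++ g.2.map (fun p => (g.1, p.1, p.2))) acc groups := by
    apply PySem.List.foldl_congr_mem
    intro acc g _
    apply PySem.List.foldl_append_singleton_eq_map
  rw [h1, PySem.List.foldl_append_eq_flatMap]
  rfl

theorem pv_A_eq_canon (groups : List (String × List (Int × Int))) :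
    flatten_groups_py groups = pvCanon (pvFlat groups) := by
  have h : flatten_groups_py groups
      = PySem.List.sorted2 (pvFlat groups) (fun y => y.1) (fun y => y.2.1) false := by
    simp only [flatten_groups_py]
    rw [pv_refs_eq, List.nil_append]
  rw [h, pv_sorted2_eq_canon]

theorem pv_buckets_eq (groups : List (String × List (Int × Int))) :
    ∀ (d : PySem.Dict String (List (Int × Int))),
    groups.foldl (fun d g => g.2.foldl (fun d p => d.modify g.1 [] (fun v => v ++ [p])) d) d
      = (pvPairs groups).foldl (fun d q => d.modify q.1 [] (fun v => v ++ [q.2])) d := by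
  induction groups with
  | nil => intro d; rfl
  | cons g gs ih =>
    intro d
    rw [List.foldl_cons, ih]
    have hp : pvPairs (g :: gs) = g.2.map (fun p => (g.1, p)) ++ pvPairs gs := by
      simp only [pvPairs, List.flatMap_cons]
    rw [hp, List.foldl_append, List.foldl_map]

theorem pv_flat_eq_map (groups : List (String × List (Int × Int))) :
    pvFlat groups = (pvPairs groups).map (fun q => (q.1, q.2.1, q.2.2)) := by
  simp [pvFlat, pvPairs, List.map_flatMap, List.map_map, Function.comp_def]

theorem pv_B_eq_canon (groups : List (String × List (Int × Int))) :
    flatten_groups_py_alt groups = pvCanon (pvFlat groups) := by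
  simp only [flatten_groups_py_alt]
  rw [pv_buckets_eq]
  set P : List (String × (Int × Int)) := pvPairs groups with hP
  set B : PySem.Dict String (List (Int × Int)) :=
    P.foldl (fun d q => d.modify q.1 [] (fun v => v ++ [q.2])) PySem.Dict.empty with hB
  have hkeys : B.keys = PySem.Set.ofList (P.map (fun q => q.1)) := by
    rw [hB, PySem.Dict.keys_foldl_modify_key, PySem.Dict.keys_empty]
    simp [PySem.Set.update, PySem.Set.ofList_eq_foldl]
  have hgetD : ∀ c, B.getD c [] = (P.filter (fun q => q.1 == c)).map (fun q => q.2) := by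
    intro c
    rw [hB, PySem.Dict.getD_foldl_modify_append, PySem.Dict.getD_empty, List.nil_append]
  -- turn the output loops into a flatMap
  have h1 : List.foldl
        (fun out k => List.foldl (fun out t => out ++ [(k, t.1, t.2)]) out (PySem.List.sorted (B.getD k []) (fun t => t.1) false))
        [] (PySem.List.sorted B.keys (fun k => k) false)
      = List.foldl
        (fun out k => out ++ (PySem.List.sorted (B.getD k []) (fun t => t.1) false).map (fun t => (k, t.1, t.2)))
        [] (PySem.List.sorted B.keys (fun k => k) false) := by
    apply PySem.List.foldl_congr_mem
    intro acc k _
    apply PySem.List.foldl_append_singleton_eq_map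
  rw [h1, PySem.List.foldl_append_eq_flatMap, List.nil_append]
  -- identify the key lists
  have hfst : (pvFlat groups).map (fun z => z.1) = P.map (fun q => q.1) := by
    simp [pvFlat, pvPairs, hP, List.map_flatMap, List.map_map]
  unfold pvCanon
  rw [hfst, PySem.List.dedup_eq_ofList, ← hkeys]
  -- identify the buckets
  refine (pv_flatMap_congr _ _ _ ?_).symm
  intro c _
  rw [hgetD c, pv_flat_eq_map, ← hP, List.filter_map, pv_sorted_map, pv_sorted_map, List.map_map]
  have hfil : P.filter ((fun z => z.1 == c) ∘ (fun q => (q.1, q.2.1, q.2.2))) = P.filter (fun q => q.1 == c) := by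
    rfl
  rw [hfil]
  refine List.map_congr_left ?_
  intro q hq
  have hq1 : q.1 = c := by
    rw [PySem.List.mem_sorted] at hq
    simpa using (List.mem_filter.mp hq).2
  simp [hq1, Function.comp]

-- ===== VERDICT (by name: the statement is the Claim_ definition above) =====
theorem flatten_groups_py_spec : Claim_equal_flatten_groups_py := by
  intro groups _
  unfold Spec_flatten_groups_py
  rw [pv_A_eq_canon, pv_B_eq_canon]
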